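-- pv_equiv track=rewrite | github.com/CardinisCode/learning-python | extra-course-practice-problems/testing_file.py | format_my_string
-- ===== SOURCE A (Python) =====
-- def format_my_string(current_string):
--     updated_string = ""
--     ordinal_values = []
--
--     for letter in current_string:
--         ordinal_value = ord(letter)
--         ordinal_values.append(ordinal_value)
--         if ordinal_value >= 65 and ordinal_value <= 90:
--             updated_string += chr(ordinal_value + 32)
--         elif ordinal_value >= 97 and ordinal_value <= 122:
--             updated_string += letter
--
--     return updated_string
-- ===== SOURCE B (Python) =====
-- import re
--
-- def format_my_string(current_string):
--     return re.sub(r'[^A-Za-z]', '', current_string).lower()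
-- ===== Notes on version B (the rewrite author's own statement) =====
-- stated objective: faster
-- what changed: Replaced the per-character ord/chr loop with an accumulator string by two whole-string passes: re.sub deletes every non-ASCII-letter character, then .lower() downcases the survivors.
import Mathlib
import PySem

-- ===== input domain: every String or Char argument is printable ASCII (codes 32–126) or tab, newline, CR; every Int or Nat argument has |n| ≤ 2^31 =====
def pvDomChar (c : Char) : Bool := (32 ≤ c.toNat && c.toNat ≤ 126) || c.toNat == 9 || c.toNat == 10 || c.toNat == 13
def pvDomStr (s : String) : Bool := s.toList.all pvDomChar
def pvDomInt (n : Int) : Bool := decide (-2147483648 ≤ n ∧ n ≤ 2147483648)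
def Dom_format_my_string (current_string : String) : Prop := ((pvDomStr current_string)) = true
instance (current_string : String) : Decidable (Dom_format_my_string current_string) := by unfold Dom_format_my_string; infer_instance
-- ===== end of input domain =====

-- B replaces A's fused per-character ord/chr loop by two passes: drop non-letters (re.sub '[^A-Za-z]'), then lowercase the rest.

-- ===== PORT A =====
-- per-character loop: accumulate (updated_string, ordinal_values); append lowered uppercase / kept lowercase chars
def format_my_string (current_string : String) : String :=
  (current_string.toList.foldl
    (fun (acc : String × List Int) letter =>
      let ordinal_value : Int := letter.toNat
      let ovs := acc.2 ++ [ordinal_value]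
      if 65 ≤ ordinal_value ∧ ordinal_value ≤ 90 then
        (acc.1 ++ String.singleton (Char.ofNat (ordinal_value + 32).toNat), ovs)
      else if 97 ≤ ordinal_value ∧ ordinal_value ≤ 122 then
        (acc.1 ++ String.singleton letter, ovs)
      else (acc.1, ovs))
    ("", [])).1

-- ===== PORT B =====
-- pass 1: re.sub(r'[^A-Za-z]', '', s) = keep exactly the ASCII letters; pass 2: .lower()
def format_my_string_alt (current_string : String) : String :=
  PySem.Str.lower (String.ofList (current_string.toList.filter PySem.Chars.isalpha))

-- ===== PRECONDITION & SPEC =====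
def Spec_format_my_string (current_string : String) (out : String) : Prop := out = format_my_string_alt current_string
instance (current_string : String) (out : String) : Decidable (Spec_format_my_string current_string out) := by unfold Spec_format_my_string; infer_instance

-- ===== CLAIM (what is proved, stated in full; the proofs are below) =====
def Claim_equal_format_my_string : Prop := ∀ (current_string : String), Dom_format_my_string current_string → Spec_format_my_string current_string (format_my_string current_string)

-- ===== LEMMAS AND PROOFS =====

theorem char_le_iff (a c : Char) : a ≤ c ↔ a.toNat ≤ c.toNat := by
  rw [Char.le_def, UInt32.le_iff_toNat_le]; exact Iff.rfl

theorem ofList_nil_append (s : String) : s ++ String.ofList [] = s := by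
  apply String.ext; simp

theorem singleton_append_ofList (c : Char) (l : List Char) :
    String.singleton c ++ String.ofList l = String.ofList (c :: l) := by
  apply String.ext; simp [String.singleton]

theorem format_my_string_loop (l : List Char) (s : String) (ovs : List Int) :
    (l.foldl
      (fun (acc : String × List Int) letter =>
        let ordinal_value : Int := letter.toNat
        let ovs := acc.2 ++ [ordinal_value]
        if 65 ≤ ordinal_value ∧ ordinal_value ≤ 90 then
          (acc.1 ++ String.singleton (Char.ofNat (ordinal_value + 32).toNat), ovs)
        else if 97 ≤ ordinal_value ∧ ordinal_value ≤ 122 then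
          (acc.1 ++ String.singleton letter, ovs)
        else (acc.1, ovs))
      (s, ovs)).1
    = s ++ String.ofList (PySem.Chars.lower (l.filter PySem.Chars.isalpha)) := by
  induction l generalizing s ovs with
  | nil => simp only [List.foldl_nil, List.filter_nil, PySem.Chars.lower, List.map_nil, ofList_nil_append]
  | cons c rest ih =>
    simp only [List.foldl_cons]
    split_ifs with h1 h2
    · have hn : 65 ≤ c.toNat ∧ c.toNat ≤ 90 := by omega
      have hAZ : 'A' ≤ c ∧ c ≤ 'Z' := ⟨(char_le_iff _ _).mpr hn.1, (char_le_iff _ _).mpr hn.2⟩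
      have hc : PySem.Chars.isalpha c = true := by
        simp [PySem.Chars.isalpha, PySem.Chars.isupper, hAZ]
      have hl : PySem.Chars.lowerChar c = Char.ofNat ((c.toNat : Int) + 32).toNat := by
        simp only [PySem.Chars.lowerChar, PySem.Chars.isupper, hAZ.1, hAZ.2, decide_true,
          Bool.and_self, if_true]
        congr 1
      rw [ih, String.append_assoc, singleton_append_ofList]
      simp [hc, PySem.Chars.lower, hl]
    · have hn : 97 ≤ c.toNat ∧ c.toNat ≤ 122 := by omega
      have haz : 'a' ≤ c ∧ c ≤ 'z' := ⟨(char_le_iff _ _).mpr hn.1, (char_le_iff _ _).mpr hn.2⟩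
      have hnAZ : ¬ ('A' ≤ c ∧ c ≤ 'Z') := by
        rintro ⟨-, hz⟩
        have h90 : c.toNat ≤ 90 := (char_le_iff _ _).mp hz
        omega
      have hc : PySem.Chars.isalpha c = true := by
        simp [PySem.Chars.isalpha, PySem.Chars.islower, haz]
      have hl : PySem.Chars.lowerChar c = c := by
        simp [PySem.Chars.lowerChar, PySem.Chars.isupper, hnAZ]
      rw [ih, String.append_assoc, singleton_append_ofList]
      simp [hc, PySem.Chars.lower, hl]
    · have eA : ('A').toNat = 65 := rfl
      have eZ : ('Z').toNat = 90 := rfl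
      have ea : ('a').toNat = 97 := rfl
      have ez : ('z').toNat = 122 := rfl
      have hc : PySem.Chars.isalpha c = false := by
        simp only [PySem.Chars.isalpha, PySem.Chars.isupper, PySem.Chars.islower,
          Bool.or_eq_false_iff, Bool.and_eq_false_iff, decide_eq_false_iff_not,
          char_le_iff, eA, eZ, ea, ez]
        omega
      rw [ih]
      simp [hc]

theorem lower_ofList (l : List Char) :
    PySem.Str.lower (String.ofList l) = String.ofList (PySem.Chars.lower l) := by
  apply String.ext
  simp [PySem.Str.toList_lower]

-- ===== VERDICT (by name: the statement is the Claim_ definition above) =====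
theorem format_my_string_spec : Claim_equal_format_my_string := by
  intro s _
  unfold Spec_format_my_string format_my_string format_my_string_alt
  rw [format_my_string_loop, lower_ofList]
  apply String.ext; simp
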